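-- pv_equiv track=rewrite | github.com/Wigsinator/advent2019 | src/Day5/d5p2.py | opcode
-- ===== SOURCE A (Python) =====
-- def opcode(val):
-- 	op = []
-- 	temp = val
-- 	temp %= 100
-- 	op.append(temp)
-- 	for pos in range(2):
-- 		temp = val
-- 		temp //= (10 ** (pos+2))
-- 		temp %= 10
-- 		op.append(temp)
-- 	return op
-- ===== SOURCE B (Python) =====
-- def opcode(val):
-- 	rest, op = divmod(val, 100)
-- 	rest, m1 = divmod(rest, 10)
-- 	rest, m2 = divmod(rest, 10)
-- 	return [op, m1, m2]
-- ===== Notes on version B (the rewrite author's own statement) =====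
-- stated objective: simpler
-- what changed: Replaces the loop that re-extracts each digit from the original value via growing powers of ten with a chained divmod decomposition threading a running quotient.
import Mathlib
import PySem

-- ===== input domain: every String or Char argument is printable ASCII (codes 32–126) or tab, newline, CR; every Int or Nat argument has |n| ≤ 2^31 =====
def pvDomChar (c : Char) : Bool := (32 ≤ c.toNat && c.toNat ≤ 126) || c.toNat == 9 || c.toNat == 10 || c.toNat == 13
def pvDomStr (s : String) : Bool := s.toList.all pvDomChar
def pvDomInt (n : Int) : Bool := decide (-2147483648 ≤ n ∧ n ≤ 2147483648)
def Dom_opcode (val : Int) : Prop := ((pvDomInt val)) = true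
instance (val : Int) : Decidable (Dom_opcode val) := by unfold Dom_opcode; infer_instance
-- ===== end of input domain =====

-- B replaces A's loop (each digit re-derived from val via 10**(pos+2)) with a chained divmod
-- threading a running quotient; objective: simpler.

-- ===== PORT A =====
def opcode (val : Int) : List Int :=
  let op : List Int := []
  let temp := val
  let temp := PySem.Int.mod temp 100
  let op := op ++ [temp]
  (PySem.List.pyRange 0 2 1).foldl (fun op pos =>
    let temp := val
    let temp := PySem.Int.floordiv temp (10 ^ (pos + 2).toNat)
    let temp := PySem.Int.mod temp 10
    op ++ [temp]) op

-- ===== PORT B =====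
def opcode_alt (val : Int) : List Int :=
  let r1 := PySem.Int.floordiv val 100
  let op := PySem.Int.mod val 100
  let r2 := PySem.Int.floordiv r1 10
  let m1 := PySem.Int.mod r1 10
  let _r3 := PySem.Int.floordiv r2 10
  let m2 := PySem.Int.mod r2 10
  [op, m1, m2]

-- ===== PRECONDITION & SPEC =====
def Spec_opcode (val : Int) (out : List Int) : Prop := out = opcode_alt val
instance (val : Int) (out : List Int) : Decidable (Spec_opcode val out) := by unfold Spec_opcode; infer_instance

-- ===== CLAIM (what is proved, stated in full; the proofs are below) =====
def Claim_equal_opcode : Prop := ∀ (val : Int), Dom_opcode val → Spec_opcode val (opcode val)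

-- ===== LEMMAS AND PROOFS =====

-- ===== VERDICT (by name: the statement is the Claim_ definition above) =====
theorem opcode_spec : Claim_equal_opcode := by
  intro val _
  show opcode val = opcode_alt val
  simp only [opcode, opcode_alt, PySem.List.pyRange]
  norm_num [show Int.toNat 2 = 2 from rfl, List.range_succ,
    show ((10:Int) ^ Int.toNat 2 = 100) from by decide,
    show ((10:Int) ^ Int.toNat 3 = 1000) from by decide]
  rw [show (1000:Int) = 100 * 10 from by norm_num, Int.ediv_ediv_of_nonneg]
  norm_num
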